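-- pv_equiv track=rewrite | github.com/hyungmogu/algorithm-and-data-structure-exercises | codility_practice/dynamic_programming/number_solitaire_video_practice_01.py | solve
-- ===== SOURCE A (Python) =====
-- def solve(A):
--
--     if len(A) == 2:
--         return sum(A)
--
--     N = len(A)
--     #   1. initialize dp
--     dp = [A[0]] + [0] * (N - 1)
--
--     index_dice = 1
--     index = 7
--     #   2. find values of dp for first 6 moves
--     while index_dice < min(7,N):
--         dp[index_dice] = max(dp[:index_dice]) + A[index_dice]
--         index_dice += 1
--
--     #   3. find values of dp for remaining moves if exist
--     while index < N:
--         dp[index] = max(dp[index - 6: index]) + A[index]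
--         index += 1
--
--     #   4. return dp[-1]
--     return dp[-1]
-- ===== SOURCE B (Python) =====
-- def solve(A):
--     # Monotonic-deque sliding-window maximum: the deque front carries the
--     # max of the last six dp values, so no dp array or slice scan is kept.
--     dp = A[0]
--     dq = [(0, dp)]  # (index, dp value), values strictly decreasing
--     for i in range(1, len(A)):
--         while dq and dq[0][0] + 6 < i:
--             dq.pop(0)
--         dp = dq[0][1] + A[i]
--         while dq and dq[-1][1] <= dp:
--             dq.pop()
--         dq.append((i, dp))
--     return dp
-- ===== Notes on version B (the rewrite author's own statement) =====
-- stated objective: alternative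
-- what changed: Replaced the dp array with per-step max() over a six-element slice by a single pass keeping a monotonic decreasing deque of (index, dp) pairs whose front is the running window maximum, so no dp list and no slice re-scan exist.
import Mathlib
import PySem

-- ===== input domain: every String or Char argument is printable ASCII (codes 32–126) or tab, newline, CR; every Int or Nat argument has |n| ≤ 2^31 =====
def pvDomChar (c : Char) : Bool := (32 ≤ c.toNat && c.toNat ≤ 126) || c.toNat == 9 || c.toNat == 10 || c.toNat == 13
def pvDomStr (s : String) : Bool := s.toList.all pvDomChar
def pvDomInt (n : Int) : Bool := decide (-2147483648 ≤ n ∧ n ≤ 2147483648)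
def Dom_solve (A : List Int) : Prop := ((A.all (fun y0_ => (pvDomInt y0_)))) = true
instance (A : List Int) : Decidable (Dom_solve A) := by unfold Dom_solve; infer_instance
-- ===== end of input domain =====

-- B replaces A's per-step max() over a six-element dp slice by a monotonic decreasing
-- deque whose front carries the sliding-window maximum (alternative data structure).

-- ===== PORT A =====
def solve (A : List Int) : Int :=
  if A.length = 2 then A.sum
  else
    let N := A.length
    -- indexing the first element raises IndexError on the empty list; excluded by Pre_solve
    let dp : List Int := [PySem.List.pyGetD A 0 0] ++ List.replicate (N - 1) 0
    -- while index_dice < min(7, N)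
    let dp := (List.range' 1 (min 7 N - 1)).foldl (fun dp (i : Nat) =>
        PySem.List.pySetD dp (i : Int)
          ((PySem.List.max? (PySem.List.slice dp none (some (i : Int))) (fun y => y)).getD 0
            + PySem.List.pyGetD A (i : Int) 0)) dp
    -- while index < N
    let dp := (List.range' 7 (N - 7)).foldl (fun dp (i : Nat) =>
        PySem.List.pySetD dp (i : Int)
          ((PySem.List.max? (PySem.List.slice dp (some ((i : Int) - 6)) (some (i : Int))) (fun y => y)).getD 0
            + PySem.List.pyGetD A (i : Int) 0)) dp
    PySem.List.pyGetD dp (-1) 0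

-- ===== PORT B =====
def solve_alt (A : List Int) : Int :=
  -- indexing the first element raises IndexError on the empty list; excluded by Pre_solve
  let dp := PySem.List.pyGetD A 0 0
  let st := (List.range' 1 (A.length - 1)).foldl
    (fun (st : List (Nat × Int) × Int) (i : Nat) =>
      -- while dq and dq[0][0] + 6 < i: dq.pop(0)
      let dq := st.1.dropWhile (fun p => p.1 + 6 < i)
      -- dp = dq[0][1] + A[i]
      let dp := ((dq.head?).map Prod.snd).getD 0 + PySem.List.pyGetD A (i : Int) 0
      -- while dq and dq[-1][1] <= dp: dq.pop()
      let dq := (dq.reverse.dropWhile (fun p => p.2 ≤ dp)).reverse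
      (dq ++ [(i, dp)], dp))
    ([((0 : Nat), dp)], dp)
  st.2

-- ===== PRECONDITION & SPEC =====
-- Pre_solve excludes only the empty list, on which both A and B raise IndexError
-- when reading the first element.
def Pre_solve (A : List Int) : Prop := A ≠ []
instance (A : List Int) : Decidable (Pre_solve A) := by unfold Pre_solve; infer_instance
def pvWitness_solve : List Int := [1, -2, 3, 0, 5, -1, 2, 4]
def Spec_solve (A : List Int) (out : Int) : Prop := out = solve_alt A
instance (A : List Int) (out : Int) : Decidable (Spec_solve A out) := by unfold Spec_solve; infer_instance

-- ===== CLAIM (what is proved, stated in full; the proofs are below) =====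
def Claim_equal_solve : Prop := ∀ (A : List Int), Dom_solve A → Pre_solve A → Spec_solve A (solve A)

-- ===== LEMMAS AND PROOFS =====

-- the dp sequence both programs compute: dpl A n = [dp 0, …, dp n]
def dpl (A : List Int) : Nat → List Int
  | 0 => [PySem.List.pyGetD A 0 0]
  | n+1 => dpl A n ++
      [(PySem.List.max? ((dpl A n).drop (n+1-6)) (fun y => y)).getD 0
        + PySem.List.pyGetD A ((n+1 : Nat) : Int) 0]

def dv (A : List Int) (n : Nat) : Int := (dpl A n).getLastD 0

theorem dpl_length (A : List Int) (n : Nat) : (dpl A n).length = n + 1 := by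
  induction n with
  | zero => rfl
  | succ n ih => simp [dpl, ih]

theorem dpl_ne_nil (A : List Int) (n : Nat) : dpl A n ≠ [] := by
  intro h
  have := dpl_length A n
  simp [h] at this

theorem dv_succ (A : List Int) (n : Nat) :
    dv A (n+1) = (PySem.List.max? ((dpl A n).drop (n+1-6)) (fun y => y)).getD 0
        + PySem.List.pyGetD A ((n+1 : Nat) : Int) 0 := by
  simp [dv, dpl]

theorem dpl_succ (A : List Int) (n : Nat) :
    dpl A (n+1) = dpl A n ++ [dv A (n+1)] := by
  rw [dv_succ]; rfl

theorem dpl_eq_map (A : List Int) (n : Nat) :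
    dpl A n = (List.range' 0 (n+1)).map (dv A) := by
  induction n with
  | zero => simp [dpl, dv]
  | succ n ih =>
    rw [dpl_succ, ih]
    rw [show List.range' 0 (n+1+1) = List.range' 0 (n+1) ++ [0+(n+1)] from List.range'_1_concat]
    simp

-- the window maximum used to produce dp (n+1)
def wmax (A : List Int) (n : Nat) : Int :=
  (PySem.List.max? ((dpl A n).drop (n+1-6)) (fun y => y)).getD 0

theorem range'_split (c n : Nat) (h : c ≤ n+1) :
    List.range' 0 (n+1) = List.range' 0 c ++ List.range' c (n+1-c) := by
  have := @List.range'_append 0 c (n+1-c) 1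
  simp at this
  rw [show c + (n+1-c) = n+1 by omega] at this
  exact this.symm

theorem window_eq (A : List Int) (n : Nat) :
    (dpl A n).drop (n+1-6) = (List.range' (n+1-6) (n+1-(n+1-6))).map (dv A) := by
  rw [dpl_eq_map, range'_split (n+1-6) n (by omega), List.map_append, List.drop_append]
  simp

theorem wmax_spec (A : List Int) (n : Nat) :
    (∃ j0, n+1-6 ≤ j0 ∧ j0 ≤ n ∧ dv A j0 = wmax A n) ∧
    (∀ j, n+1-6 ≤ j → j ≤ n → dv A j ≤ wmax A n) := by
  have hne : (dpl A n).drop (n+1-6) ≠ [] := by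
    have := dpl_length A n
    intro h
    have : (dpl A n).length - (n+1-6) = 0 := by rw [← List.length_drop, h]; rfl
    omega
  obtain ⟨m, hm⟩ : ∃ m, PySem.List.max? ((dpl A n).drop (n+1-6)) (fun y => y) = some m := by
    cases hmx : PySem.List.max? ((dpl A n).drop (n+1-6)) (fun y => y) with
    | none => exact absurd ((PySem.List.max?_eq_none_iff _ _).mp hmx) hne
    | some m => exact ⟨m, rfl⟩
  have hwm : wmax A n = m := by unfold wmax; rw [hm]; rfl
  have hmem := PySem.List.max?_mem hm
  have hmax := PySem.List.max?_isMax hm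
  rw [window_eq] at hmem hmax
  constructor
  · obtain ⟨j0, hj0, hj0v⟩ := List.mem_map.mp hmem
    rw [List.mem_range'_1] at hj0
    exact ⟨j0, by omega, by omega, by rw [hj0v, hwm]⟩
  · intro j h1 h2
    rw [hwm]
    exact hmax (dv A j) (List.mem_map.mpr ⟨j, List.mem_range'_1.mpr ⟨h1, by omega⟩, rfl⟩)

theorem dv_succ' (A : List Int) (n : Nat) :
    dv A (n+1) = wmax A n + PySem.List.pyGetD A ((n+1 : Nat) : Int) 0 := dv_succ A n

-- ---------- A side ----------

def stepA (A : List Int) (dp : List Int) (i : Nat) : List Int :=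
  dp.set i ((PySem.List.max? ((dp.take i).drop (i-6)) (fun y => y)).getD 0
    + PySem.List.pyGetD A (i : Int) 0)

theorem pySetD_natCast_set (xs : List Int) (n : Nat) (v : Int) :
    PySem.List.pySetD xs (n : Int) v = xs.set n v := by
  by_cases h : n < xs.length
  · simp [PySem.List.pySetD, PySem.List.pySet?_natCast xs n v h]
  · have hid : PySem.List.pyIdx? xs.length (n : Int) = none := by
      simp [PySem.List.pyIdx?]; omega
    have hset : xs.set n v = xs := List.set_eq_of_length_le (by omega)
    simp [PySem.List.pySetD, PySem.List.pySet?, hid, hset]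

theorem Aloop (A : List Int) (N : Nat) (m : Nat) (hm : m ≤ N - 1) :
    (List.range' 1 m).foldl (stepA A) (dpl A 0 ++ List.replicate (N - 1) 0)
      = dpl A m ++ List.replicate (N - 1 - m) 0 := by
  induction m with
  | zero => simp
  | succ m ih =>
    rw [List.range'_1_concat, List.foldl_append, ih (by omega)]
    simp only [List.foldl_cons, List.foldl_nil]
    rw [show 1 + m = m + 1 by omega]
    unfold stepA
    have htake : (dpl A m ++ List.replicate (N-1-m) (0:Int)).take (m+1) = dpl A m :=
      List.take_left' (dpl_length A m)
    rw [htake]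
    have hval : (PySem.List.max? ((dpl A m).drop (m+1-6)) (fun y => y)).getD 0
        + PySem.List.pyGetD A ((m+1 : Nat) : Int) 0 = dv A (m+1) := (dv_succ A m).symm
    rw [hval]
    have hrep : List.replicate (N-1-m) (0:Int) = 0 :: List.replicate (N-1-(m+1)) 0 := by
      rw [show N-1-m = (N-1-(m+1))+1 by omega, List.replicate_succ]
    rw [hrep, List.set_append_right (m+1) _ (by rw [dpl_length]),
        show m+1 - (dpl A m).length = 0 by simp [dpl_length],
        List.set_cons_zero, dpl_succ]
    simp

theorem solve_eq_dv (A : List Int) (h : A ≠ []) : solve A = dv A (A.length - 1) := by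
  by_cases hl : A.length = 2
  · obtain ⟨a, b, rfl⟩ := List.length_eq_two.mp hl
    rw [show ([a,b] : List Int).length - 1 = 0 + 1 from rfl, dv_succ']
    simp [solve, wmax, dpl, PySem.List.max?_id_cons, PySem.List.pyGetD, PySem.List.pyGet?, PySem.List.pyIdx?]
  · have hsolve : solve A = PySem.List.pyGetD
        ((List.range' 7 (A.length - 7)).foldl (fun dp (i : Nat) =>
          PySem.List.pySetD dp (i : Int)
            ((PySem.List.max? (PySem.List.slice dp (some ((i : Int) - 6)) (some (i : Int))) (fun y => y)).getD 0
              + PySem.List.pyGetD A (i : Int) 0))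
          ((List.range' 1 (min 7 A.length - 1)).foldl (fun dp (i : Nat) =>
            PySem.List.pySetD dp (i : Int)
              ((PySem.List.max? (PySem.List.slice dp none (some (i : Int))) (fun y => y)).getD 0
                + PySem.List.pyGetD A (i : Int) 0))
            ([PySem.List.pyGetD A 0 0] ++ List.replicate (A.length - 1) 0))) (-1) 0 := by
      unfold solve
      rw [if_neg hl]
    rw [hsolve]
    have hc1 : ∀ init : List Int,
        List.foldl (fun dp (i : Nat) => PySem.List.pySetD dp (i : Int)
          ((PySem.List.max? (PySem.List.slice dp none (some (i : Int))) (fun y => y)).getD 0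
            + PySem.List.pyGetD A (i : Int) 0)) init (List.range' 1 (min 7 A.length - 1))
        = List.foldl (stepA A) init (List.range' 1 (min 7 A.length - 1)) := by
      intro init
      apply PySem.List.foldl_congr_mem
      intro dp i hi
      rw [List.mem_range'_1] at hi
      have h6 : i - 6 = 0 := by omega
      unfold stepA
      rw [PySem.List.slice_to_natCast, pySetD_natCast_set, h6, List.drop_zero]
    have hc2 : ∀ init : List Int,
        List.foldl (fun dp (i : Nat) => PySem.List.pySetD dp (i : Int)
          ((PySem.List.max? (PySem.List.slice dp (some ((i : Int) - 6)) (some (i : Int))) (fun y => y)).getD 0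
            + PySem.List.pyGetD A (i : Int) 0)) init (List.range' 7 (A.length - 7))
        = List.foldl (stepA A) init (List.range' 7 (A.length - 7)) := by
      intro init
      apply PySem.List.foldl_congr_mem
      intro dp i hi
      rw [List.mem_range'_1] at hi
      unfold stepA
      rw [show (i:Int) - 6 = ((i - 6 : Nat) : Int) by
            push_cast [Nat.cast_sub (by omega : 6 ≤ i)]; ring,
          PySem.List.slice_natCast, pySetD_natCast_set, List.drop_take]
    rw [hc1, hc2, ← List.foldl_append]
    have hranges : List.range' 1 (min 7 A.length - 1) ++ List.range' 7 (A.length - 7)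
        = List.range' 1 (A.length - 1) := by
      rcases Nat.lt_or_ge A.length 7 with h7 | h7
      · rw [min_eq_right (by omega), show A.length - 7 = 0 by omega]
        simp
      · rw [min_eq_left h7, show (7:Nat) - 1 = 6 from rfl]
        have hap := @List.range'_append 1 6 (A.length - 7) 1
        simp at hap
        rw [show 6 + (A.length - 7) = A.length - 1 by omega] at hap
        exact hap
    rw [hranges,
        show ([PySem.List.pyGetD A 0 0] : List Int) = dpl A 0 from rfl,
        Aloop A A.length (A.length - 1) le_rfl]
    simp only [Nat.sub_self, List.replicate_zero, List.append_nil]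
    rw [PySem.List.pyGetD_neg_one _ _ (dpl_ne_nil A (A.length - 1)),
        dv, List.getLastD_eq_getLast?, List.getLast?_eq_some_getLast (dpl_ne_nil A (A.length-1))]
    rfl

-- ---------- B side ----------

def DqInv (A : List Int) (i : Nat) (dq : List (Nat × Int)) : Prop :=
  (∀ p ∈ dq, p.2 = dv A p.1 ∧ p.1 ≤ i) ∧
  dq.Pairwise (fun p q => p.1 < q.1 ∧ q.2 < p.2) ∧
  (∀ j, i-6 ≤ j → j ≤ i → ∃ p ∈ dq, j ≤ p.1 ∧ dv A j ≤ p.2)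

def stepB (A : List Int) (st : List (Nat × Int) × Int) (i : Nat) : List (Nat × Int) × Int :=
  let dq := st.1.dropWhile (fun p => p.1 + 6 < i)
  let dp := ((dq.head?).map Prod.snd).getD 0 + PySem.List.pyGetD A (i : Int) 0
  let dq := (dq.reverse.dropWhile (fun p => p.2 ≤ dp)).reverse
  (dq ++ [(i, dp)], dp)

-- all elements surviving a dropWhile fail the test, provided failing is upward-closed along R
theorem dropWhile_all_false {α : Type} (R : α → α → Prop) (c : α → Bool) (l : List α)
    (hp : l.Pairwise R) (hmono : ∀ a b, R a b → c a = false → c b = false) :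
    ∀ p ∈ l.dropWhile c, c p = false := by
  induction l with
  | nil => simp
  | cons a t ih =>
    intro p hpmem
    rw [List.pairwise_cons] at hp
    by_cases ha : c a
    · rw [List.dropWhile_cons_of_pos ha] at hpmem
      exact ih hp.2 p hpmem
    · rw [List.dropWhile_cons_of_neg ha] at hpmem
      rcases List.mem_cons.mp hpmem with rfl | hpt
      · simpa using ha
      · exact hmono a p (hp.1 p hpt) (by simpa using ha) 

theorem mem_dropWhile_of_neg {α : Type} (c : α → Bool) (l : List α) (p : α)
    (hmem : p ∈ l) (hc : c p = false) : p ∈ l.dropWhile c := by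
  rw [← List.takeWhile_append_dropWhile (p := c) (l := l), List.mem_append] at hmem
  rcases hmem with h | h
  · exact absurd (List.mem_takeWhile_imp h) (by simp [hc])
  · exact h

-- the tail-popped deque is a sublist of the original
theorem popTail_sublist {α : Type} (c : α → Bool) (l : List α) :
    ((l.reverse.dropWhile c).reverse).Sublist l := by
  have := (List.dropWhile_sublist (l := l.reverse) c).reverse
  simpa using this

theorem inv_step (A : List Int) (i : Nat) (dq : List (Nat × Int)) (x : Int)
    (hinv : DqInv A i dq) :
    (stepB A (dq, x) (i+1)).2 = dv A (i+1) ∧ DqInv A (i+1) ((stepB A (dq, x) (i+1)).1) := by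
  obtain ⟨hmem, hpair, hdom⟩ := hinv
  set c1 : Nat × Int → Bool := fun p => decide (p.1 + 6 < i+1) with hc1
  set dq1 := dq.dropWhile c1 with hdq1
  have hsub1 : dq1.Sublist dq := List.dropWhile_sublist c1
  have hmem1 : ∀ p ∈ dq1, p ∈ dq := fun p hp => hsub1.subset hp
  have hpair1 : dq1.Pairwise (fun p q => p.1 < q.1 ∧ q.2 < p.2) := hpair.sublist hsub1
  have hfalse1 : ∀ p ∈ dq1, c1 p = false := by
    apply dropWhile_all_false _ c1 dq hpair
    intro a b hr ha
    simp only [hc1, decide_eq_false_iff_not, not_lt] at ha ⊢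
    omega
  -- the window argmax survives eviction
  obtain ⟨⟨j0, hj01, hj02, hj0v⟩, hwub⟩ := wmax_spec A i
  obtain ⟨p0, hp0mem, hp0ge, hp0le⟩ := hdom j0 (by omega) hj02
  have hp0in1 : p0 ∈ dq1 := mem_dropWhile_of_neg c1 dq p0 hp0mem
    (by simp only [hc1, decide_eq_false_iff_not, not_lt]; omega)
  obtain ⟨hd, tl, hcons⟩ : ∃ hd tl, dq1 = hd :: tl := by
    cases h : dq1 with
    | nil => rw [h] at hp0in1; simp at hp0in1
    | cons a t => exact ⟨a, t, rfl⟩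
  have hhd_mem : hd ∈ dq := hmem1 hd (by rw [hcons]; simp)
  have hhd_dv : hd.2 = dv A hd.1 := (hmem hd hhd_mem).1
  have hhd_le : hd.1 ≤ i := (hmem hd hhd_mem).2
  have hhd_lb : i+1-6 ≤ hd.1 := by
    have := hfalse1 hd (by rw [hcons]; simp)
    simp only [hc1, decide_eq_false_iff_not, not_lt] at this
    omega
  -- the head value is the window maximum
  have hhd_max : hd.2 = wmax A i := by
    apply le_antisymm
    · rw [hhd_dv]; exact hwub hd.1 hhd_lb hhd_le
    · rw [← hj0v]
      calc dv A j0 ≤ p0.2 := hp0le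
        _ ≤ hd.2 := by
          rcases List.mem_cons.mp (by rw [← hcons]; exact hp0in1 : p0 ∈ hd :: tl) with h | h
          · simp_all
          · rw [hcons, List.pairwise_cons] at hpair1
            exact le_of_lt (hpair1.1 p0 (by simpa using h)).2
  -- the computed dp value is dv A (i+1)
  have hdpval : ((dq1.head?).map Prod.snd).getD 0 + PySem.List.pyGetD A ((i+1 : Nat) : Int) 0
      = dv A (i+1) := by
    rw [hcons]; simp only [List.head?_cons, Option.map_some, Option.getD_some]
    rw [hhd_max, ← dv_succ']
  set dpv := dv A (i+1) with hdpv
  set c2 : Nat × Int → Bool := fun p => decide (p.2 ≤ dpv) with hc2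
  set r := (dq1.reverse.dropWhile c2).reverse with hr
  have hrsub : r.Sublist dq1 := popTail_sublist c2 dq1
  have hrmem : ∀ p ∈ r, p ∈ dq1 := fun p hp => hrsub.subset hp
  have hrgt : ∀ p ∈ r, dpv < p.2 := by
    intro p hp
    have hrev : p ∈ dq1.reverse.dropWhile c2 := by
      have : p ∈ (dq1.reverse.dropWhile c2).reverse := by rw [← hr]; exact hp
      simpa using this
    have := dropWhile_all_false (fun a b => b.1 < a.1 ∧ a.2 < b.2) c2 dq1.reverse
      (List.pairwise_reverse.mpr hpair1)
      (by intro a b hr2 ha; simp only [hc2, decide_eq_false_iff_not, not_le] at ha ⊢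
          exact lt_trans ha hr2.2) p hrev
    simpa [hc2] using this
  have hrcompl : ∀ p ∈ dq1, p ∉ r → p.2 ≤ dpv := by
    intro p hp hnr
    have hprev : p ∈ dq1.reverse := by simpa using hp
    rw [← List.takeWhile_append_dropWhile (p := c2) (l := dq1.reverse), List.mem_append] at hprev
    rcases hprev with h | h
    · have := List.mem_takeWhile_imp h
      simpa [hc2] using this
    · exact absurd (by rw [hr]; simpa using h) hnr
  -- the step computes (r ++ [(i+1, dpv)], dpv)
  have hstep : stepB A (dq, x) (i+1) = (r ++ [(i+1, dpv)], dpv) := by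
    simp only [stepB]
    rw [← hc1, ← hdq1, hdpval, ← hc2, ← hr]
  rw [hstep]
  refine ⟨rfl, ?_, ?_, ?_⟩
  · -- membership facts
    intro p hp
    rcases List.mem_append.mp hp with h | h
    · have := hmem p (hmem1 p (hrmem p h))
      exact ⟨this.1, by omega⟩
    · simp at h
      rw [h]
      exact ⟨rfl, le_rfl⟩
  · -- pairwise
    rw [List.pairwise_append]
    refine ⟨hpair1.sublist hrsub, by simp, ?_⟩
    intro p hp q hq
    simp at hq
    rw [hq]
    have h1 : p.1 ≤ i := (hmem p (hmem1 p (hrmem p hp))).2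
    exact ⟨by omega, hrgt p hp⟩
  · -- domination
    intro j hj1 hj2
    rcases Nat.eq_or_lt_of_le hj2 with rfl | hj3
    · exact ⟨(i+1, dpv), by simp, le_rfl, le_of_eq (by rw [hdpv])⟩
    · have hj4 : j ≤ i := by omega
      obtain ⟨p, hpmem, hpge, hple⟩ := hdom j (by omega) hj4
      have hpin1 : p ∈ dq1 := mem_dropWhile_of_neg c1 dq p hpmem
        (by simp only [hc1, decide_eq_false_iff_not, not_lt]; omega)
      by_cases hpr : p ∈ r
      · exact ⟨p, List.mem_append.mpr (Or.inl hpr), hpge, hple⟩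
      · exact ⟨(i+1, dpv), by simp, by omega,
          le_trans hple (le_trans (hrcompl p hpin1 hpr) le_rfl)⟩

theorem Bloop (A : List Int) (m : Nat) :
    ∃ dq, (List.range' 1 m).foldl (stepB A) ([(0, dv A 0)], dv A 0) = (dq, dv A m)
      ∧ DqInv A m dq := by
  induction m with
  | zero =>
    refine ⟨[(0, dv A 0)], by simp, ?_, ?_, ?_⟩
    · intro p hp; simp at hp; rw [hp]; exact ⟨rfl, le_rfl⟩
    · simp
    · intro j h1 h2
      have hj : j = 0 := by omega
      exact ⟨(0, dv A 0), by simp, by omega, le_of_eq (by rw [hj])⟩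
  | succ m ih =>
    obtain ⟨dq, heq, hinv⟩ := ih
    rw [List.range'_1_concat, List.foldl_append, heq]
    simp only [List.foldl_cons, List.foldl_nil]
    rw [show 1 + m = m + 1 by omega]
    obtain ⟨h2, hinv'⟩ := inv_step A m dq (dv A m) hinv
    exact ⟨(stepB A (dq, dv A m) (m+1)).1, by rw [← h2], hinv'⟩

theorem solve_alt_eq_dv (A : List Int) : solve_alt A = dv A (A.length - 1) := by
  obtain ⟨dq, heq, _⟩ := Bloop A (A.length - 1)
  show ((List.range' 1 (A.length - 1)).foldl (stepB A)
      ([(0, PySem.List.pyGetD A 0 0)], PySem.List.pyGetD A 0 0)).2 = dv A (A.length - 1)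
  rw [show PySem.List.pyGetD A 0 0 = dv A 0 from rfl, heq]

-- ===== VERDICT (by name: the statement is the Claim_ definition above) =====
theorem solve_spec : Claim_equal_solve := by
  intro A _ hpre
  unfold Spec_solve
  rw [solve_eq_dv A hpre, solve_alt_eq_dv A]
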